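-- pv_equiv track=rewrite | github.com/egenillo/helm-upgrade-preview | src/helm_preview/parser/manifest.py | _split_raw_docs
-- ===== SOURCE A (Python) =====
-- def _split_raw_docs(yaml_text: str) -> list[str]:
--     """Split multi-doc YAML by --- delimiters, returning raw text per doc."""
--     docs: list[str] = []
--     current_lines: list[str] = []
--
--     for line in yaml_text.splitlines(keepends=True):
--         if line.rstrip() == "---":
--             if current_lines:
--                 docs.append("".join(current_lines))
--                 current_lines = []
--         else:
--             current_lines.append(line)
--
--     if current_lines:
--         docs.append("".join(current_lines))
--
--     return docs
-- ===== SOURCE B (Python) =====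
-- def _split_raw_docs(yaml_text: str) -> list[str]:
--     """Split multi-doc YAML by --- delimiters, returning raw text per doc."""
--     lines = yaml_text.splitlines(keepends=True)
--     docs: list[str] = []
--     i, n = 0, len(lines)
--     while i < n:
--         if lines[i].rstrip() == "---":
--             i += 1
--             continue
--         j = i + 1
--         while j < n and lines[j].rstrip() != "---":
--             j += 1
--         docs.append("".join(lines[i:j]))
--         i = j + 1
--     return docs
-- ===== Notes on version B (the rewrite author's own statement) =====
-- stated objective: alternative
-- what changed: Replaces A's accumulator-and-flush loop (collecting lines one by one, flushing at each delimiter and at the end) with a two-pointer scan that skips delimiter lines and joins each maximal run of non-delimiter lines in a single slice.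
import Mathlib
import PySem

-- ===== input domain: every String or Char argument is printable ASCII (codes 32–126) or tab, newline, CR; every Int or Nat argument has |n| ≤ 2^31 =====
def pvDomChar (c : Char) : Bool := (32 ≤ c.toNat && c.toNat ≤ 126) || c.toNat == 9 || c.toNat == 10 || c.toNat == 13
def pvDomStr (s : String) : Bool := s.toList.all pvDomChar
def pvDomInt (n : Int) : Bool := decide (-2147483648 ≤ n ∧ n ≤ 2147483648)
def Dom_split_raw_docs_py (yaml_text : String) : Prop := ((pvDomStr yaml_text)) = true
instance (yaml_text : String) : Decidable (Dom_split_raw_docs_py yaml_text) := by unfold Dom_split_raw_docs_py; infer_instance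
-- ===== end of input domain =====

-- B replaces A's accumulator-and-flush loop with a two-pointer scan that joins each
-- maximal run of non-delimiter lines in one slice (objective: alternative decomposition).

-- shared helper: Python's str.splitlines(keepends=True), hand-ported; exact for the
-- line endings '\n', '\r', '\r\n' (the only line breaks inside Dom's character set)
def pvLinesGo (acc : List Char) : List Char → List (List Char)
  | [] => if acc.isEmpty then [] else [acc.reverse]
  | '\r' :: '\n' :: rest => (acc.reverse ++ ['\r', '\n']) :: pvLinesGo [] rest
  | c :: rest =>
    if c = '\n' then (acc.reverse ++ ['\n']) :: pvLinesGo [] rest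
    else if c = '\r' then (acc.reverse ++ ['\r']) :: pvLinesGo [] rest
    else pvLinesGo (c :: acc) rest

def pvLines (s : List Char) : List (List Char) := pvLinesGo [] s

-- shared predicate: line.rstrip() == "---"
def pvIsDelim (l : List Char) : Bool := PySem.Chars.rstrip l == "---".toList

-- ===== PORT A =====
-- loop body: flush current_lines on a delimiter line, otherwise append the line
def pvStepA (s : List (List Char) × List (List Char)) (line : List Char) :
    List (List Char) × List (List Char) :=
  if pvIsDelim line then (if s.2 ≠ [] then (s.1 ++ [s.2.flatten], []) else s)
  else (s.1, s.2 ++ [line])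

-- final flush after the loop
def pvFinA (s : List (List Char) × List (List Char)) : List (List Char) :=
  if s.2 ≠ [] then s.1 ++ [s.2.flatten] else s.1

def split_raw_docs_py (yaml_text : String) : List String :=
  (pvFinA ((pvLines yaml_text.toList).foldl pvStepA ([], []))).map String.ofList

-- ===== PORT B =====
-- two-pointer scan: skip delimiter lines; join each maximal non-delimiter run at once
def pvSplitRuns : List (List Char) → List (List Char)
  | [] => []
  | l :: ls =>
    if pvIsDelim l then pvSplitRuns ls
    else (l :: ls.takeWhile (fun x => !pvIsDelim x)).flatten ::
         pvSplitRuns ((ls.dropWhile (fun x => !pvIsDelim x)).tail)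
termination_by l => l.length
decreasing_by
  · simp
  · have h1 : (ls.dropWhile (fun x => !pvIsDelim x)).length ≤ ls.length :=
      List.length_dropWhile_le _ _
    have h2 : (ls.dropWhile (fun x => !pvIsDelim x)).tail.length ≤
        (ls.dropWhile (fun x => !pvIsDelim x)).length := by
      cases ls.dropWhile (fun x => !pvIsDelim x) <;> simp
    simp only [List.length_cons]; omega

def split_raw_docs_py_alt (yaml_text : String) : List String :=
  (pvSplitRuns (pvLines yaml_text.toList)).map String.ofList

-- ===== PRECONDITION & SPEC =====
def Spec_split_raw_docs_py (yaml_text : String) (out : List String) : Prop := out = split_raw_docs_py_alt yaml_text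
instance (yaml_text : String) (out : List String) : Decidable (Spec_split_raw_docs_py yaml_text out) := by unfold Spec_split_raw_docs_py; infer_instance

-- ===== CLAIM (what is proved, stated in full; the proofs are below) =====
def Claim_equal_split_raw_docs_py : Prop := ∀ (yaml_text : String), Dom_split_raw_docs_py yaml_text → Spec_split_raw_docs_py yaml_text (split_raw_docs_py yaml_text)

-- ===== LEMMAS AND PROOFS =====

-- characterisation of A's loop with pending lines `cur` still unflushed
def pvPending : List (List Char) → List (List Char) → List (List Char)
  | cur, [] => if cur = [] then [] else [cur.flatten]
  | cur, l :: ls =>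
    if pvIsDelim l then (if cur = [] then pvPending [] ls else cur.flatten :: pvPending [] ls)
    else pvPending (cur ++ [l]) ls

theorem pvFoldA_eq_pending (lines : List (List Char)) :
    ∀ (docs cur : List (List Char)),
      pvFinA (lines.foldl pvStepA (docs, cur)) = docs ++ pvPending cur lines := by
  induction lines with
  | nil =>
    intro docs cur
    by_cases h : cur = [] <;> simp [pvFinA, pvPending, h]
  | cons l ls ih =>
    intro docs cur
    by_cases hd : pvIsDelim l
    · by_cases hc : cur = []
      · simp [pvStepA, pvPending, hd, hc, ih]
      · simp [pvStepA, pvPending, hd, hc, ih]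
    · simp [pvStepA, pvPending, hd, ih]

theorem pvPending_spec (lines : List (List Char)) :
    pvPending [] lines = pvSplitRuns lines ∧
    ∀ cur : List (List Char), cur ≠ [] →
      pvPending cur lines =
        (cur.flatten ++ (lines.takeWhile (fun x => !pvIsDelim x)).flatten) ::
          pvSplitRuns ((lines.dropWhile (fun x => !pvIsDelim x)).tail) := by
  induction lines with
  | nil =>
    refine ⟨by simp [pvPending, pvSplitRuns], ?_⟩
    intro cur hc
    simp [pvPending, pvSplitRuns, hc]
  | cons l ls ih =>
    obtain ⟨ih1, ih2⟩ := ih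
    by_cases hd : pvIsDelim l
    · refine ⟨by simp [pvPending, pvSplitRuns, hd, ih1], ?_⟩
      intro cur hc
      simp [pvPending, hd, hc, ih1]
    · constructor
      · have := ih2 [l] (by simp)
        rw [pvSplitRuns]
        simp [pvPending, hd, this]
      · intro cur hc
        have := ih2 (cur ++ [l]) (by simp)
        simp [pvPending, hd, this]

-- ===== VERDICT (by name: the statement is the Claim_ definition above) =====
theorem split_raw_docs_py_spec : Claim_equal_split_raw_docs_py := by
  intro yaml_text _
  unfold Spec_split_raw_docs_py split_raw_docs_py split_raw_docs_py_alt
  rw [pvFoldA_eq_pending, (pvPending_spec _).1]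
  simp
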